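-- pv_equiv track=rewrite | github.com/alexander-mcdowell/AdventOfCode | 2018/day8/day8.py | f
-- ===== SOURCE A (Python) =====
-- def f(s, i, node, tree):
--     num_children, header_len = s[i], s[i + 1]
--     children = []
--     node2 = node
--     i += 2
--     for _ in range(num_children):
--         children.append(node2 + 1)
--         node2, i = f(s, i, node2 + 1, tree)
--     tree[node] = [children, s[i : i + header_len]]
--     return node2, i + header_len
-- ===== SOURCE B (Python) =====
-- def f(s, i, node, tree):
--     counter = node
--     nc, hl = s[i], s[i + 1]
--     stack = [[node, nc, hl, []]]
--     i += 2
--     while stack: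
--         frame = stack[-1]
--         if frame[1] > 0:
--             frame[1] -= 1
--             counter += 1
--             frame[3].append(counter)
--             nc, hl = s[i], s[i + 1]
--             stack.append([counter, nc, hl, []])
--             i += 2
--         else:
--             nid, _, hl, children = stack.pop()
--             tree[nid] = [children, s[i : i + hl]]
--             i += hl
--     return counter, i
-- ===== Notes on version B (the rewrite author's own statement) =====
-- stated objective: alternative
-- what changed: Replaces the recursive descent (recursion for each node, inner for-loop over children) by a single iterative while-loop over an explicit stack of frames (id, remaining children, header_len, children collected), with one running id counter; no Python recursion limit applies.
import Mathlib
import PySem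

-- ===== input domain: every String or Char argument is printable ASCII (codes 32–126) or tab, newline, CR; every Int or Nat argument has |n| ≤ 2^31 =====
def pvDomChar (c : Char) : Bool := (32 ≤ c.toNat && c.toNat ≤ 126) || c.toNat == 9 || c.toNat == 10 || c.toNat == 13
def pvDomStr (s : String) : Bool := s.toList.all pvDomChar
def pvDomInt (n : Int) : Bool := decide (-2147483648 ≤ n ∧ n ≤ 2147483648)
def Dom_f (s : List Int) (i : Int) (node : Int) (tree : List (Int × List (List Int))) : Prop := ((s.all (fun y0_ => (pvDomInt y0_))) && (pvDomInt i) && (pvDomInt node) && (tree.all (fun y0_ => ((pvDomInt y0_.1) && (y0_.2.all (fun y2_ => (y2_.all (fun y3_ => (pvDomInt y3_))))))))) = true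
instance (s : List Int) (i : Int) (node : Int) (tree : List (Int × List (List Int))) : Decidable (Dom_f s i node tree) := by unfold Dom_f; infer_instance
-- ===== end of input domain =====

-- B replaces A's recursion by an iterative parser over an explicit stack of frames (id, remaining children,
-- header_len, children so far); A and B both mutate `tree` in place identically — the equivalence proved here
-- is about the RETURN value (node2, end index) only, and both ports thread the dict state faithfully.

-- ===== PORT A =====
-- A's `for _ in range(num_children)` loop, with the recursive call passed in as `g` (= fA fuel);
-- state (i, node2, children, tree) exactly as in the Python loop.
def fALoop (g : List Int → Int → Int → PySem.Dict Int (List (List Int)) → Option (Int × Int × PySem.Dict Int (List (List Int))))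
    (s : List Int) : Int → Int → List Int → PySem.Dict Int (List (List Int)) → Nat →
    Option (Int × Int × List Int × PySem.Dict Int (List (List Int)))
  | i, node2, ch, tree, 0 => some (node2, i, ch, tree)
  | i, node2, ch, tree, cnt + 1 =>
    match g s i (node2 + 1) tree with
    | some (n', i', t') => fALoop g s i' n' (ch ++ [node2 + 1]) t' cnt
    | none => none

-- fuel only guards totality: one unit per recursion level; Python raises (IndexError/RecursionError) ↦ none.
def fA : Nat → List Int → Int → Int → PySem.Dict Int (List (List Int)) →
    Option (Int × Int × PySem.Dict Int (List (List Int)))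
  | 0, _, _, _, _ => none
  | d + 1, s, i, node, tree =>
    match PySem.List.pyGet? s i, PySem.List.pyGet? s (i + 1) with
    | some nc, some hl =>
      match fALoop (fA d) s (i + 2) node [] tree nc.toNat with
      | some (n2, i2, ch, t2) =>
        some (n2, i2 + hl, t2.insert node [ch, PySem.List.slice s (some i2) (some (i2 + hl))])
      | none => none
    | _, _ => none

def f (s : List Int) (i : Int) (node : Int) (tree : List (Int × List (List Int))) : Int × Int :=
  match fA (2 * s.length + 1) s i node (PySem.Dict.ofList tree) with
  | some (n2, iend, _) => (n2, iend)
  | none => (0, 0)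

-- ===== PORT B =====
-- B's `while stack:` loop; a frame is (id, remaining, header_len, children); fuel is one unit per iteration.
def loopB (s : List Int) : Nat → Int → Int → List (Int × Int × Int × List Int) →
    PySem.Dict Int (List (List Int)) → Option (Int × Int)
  | 0, _, _, _, _ => none
  | fuel + 1, i, counter, stack, tree =>
    match stack with
    | [] => some (counter, i)
    | (id, rem, hl, ch) :: rest =>
      if 0 < rem then
        match PySem.List.pyGet? s i, PySem.List.pyGet? s (i + 1) with
        | some nc2, some hl2 =>
          loopB s fuel (i + 2) (counter + 1)
            ((counter + 1, nc2, hl2, []) :: (id, rem - 1, hl, ch ++ [counter + 1]) :: rest) tree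
        | _, _ => none
      else
        loopB s fuel (i + hl) counter rest
          (tree.insert id [ch, PySem.List.slice s (some i) (some (i + hl))])

def f_alt (s : List Int) (i : Int) (node : Int) (tree : List (Int × List (List Int))) : Int × Int :=
  match PySem.List.pyGet? s i, PySem.List.pyGet? s (i + 1) with
  | some nc, some hl =>
    (loopB s ((2 ^ 32) ^ (2 * s.length + 2) + 1) (i + 2) node [(node, nc, hl, [])]
      (PySem.Dict.ofList tree)).getD (0, 0)
  | _, _ => (0, 0)

-- ===== PRECONDITION & SPEC =====
-- Grammar membership only (no node ids, no tree, no outputs): a node at i is nc, hl, nc child nodes, then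
-- `+ hl` (the metadata slice itself clamps and never raises).  Depth fuel 2*len+1 is exact: a returning run
-- of A reads distinct positions in [-len, len) along any ancestor chain (a repeat implies infinite recursion).
def validSeqG (g : List Int → Int → Option Int) (s : List Int) : Int → Nat → Option Int
  | i, 0 => some i
  | i, cnt + 1 =>
    match g s i with
    | some j => validSeqG g s j cnt
    | none => none

def validNode : Nat → List Int → Int → Option Int
  | 0, _, _ => none
  | d + 1, s, i =>
    match PySem.List.pyGet? s i, PySem.List.pyGet? s (i + 1) with
    | some nc, some hl =>
      match validSeqG (validNode d) s (i + 2) nc.toNat with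
      | some j => some (j + hl)
      | none => none
    | _, _ => none

-- Pre_: grammar membership — a well-formed node starts at index i (every header read lands in range;
-- Python A raises IndexError exactly otherwise).  For a recursive grammar this shape condition is
-- itself recursive; validNode above is the declarative grammar only, not the algorithm.
def Pre_f (s : List Int) (i : Int) (node : Int) (tree : List (Int × List (List Int))) : Prop :=
  (validNode (2 * s.length + 1) s i).isSome = true
instance (s : List Int) (i : Int) (node : Int) (tree : List (Int × List (List Int))) : Decidable (Pre_f s i node tree) := by unfold Pre_f; infer_instance

def pvWitness_f : List Int × Int × Int × (List (Int × List (List Int))) := ([0, 0], 0, 0, [])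

def Spec_f (s : List Int) (i : Int) (node : Int) (tree : List (Int × List (List Int))) (out : Int × Int) : Prop := out = f_alt s i node tree
instance (s : List Int) (i : Int) (node : Int) (tree : List (Int × List (List Int))) (out : Int × Int) : Decidable (Spec_f s i node tree out) := by unfold Spec_f; infer_instance

-- ===== CLAIM (what is proved, stated in full; the proofs are below) =====
def Claim_equal_f : Prop := ∀ (s : List Int) (i : Int) (node : Int) (tree : List (Int × List (List Int))), Dom_f s i node tree → Pre_f s i node tree → Spec_f s i node tree (f s i node tree)

-- ===== LEMMAS AND PROOFS =====

-- fuel monotonicity of the stack loop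
theorem loopB_mono : ∀ (F F' : Nat), F ≤ F' → ∀ i c st t r,
    loopB s F i c st t = some r → loopB s F' i c st t = some r := by
  intro F
  induction F with
  | zero => intro F' _ i c st t r h; simp [loopB] at h
  | succ F ih =>
    intro F' hle i c st t r h
    obtain ⟨F'', rfl⟩ : ∃ F'', F' = F'' + 1 := ⟨F' - 1, by omega⟩
    have hle' : F ≤ F'' := by omega
    match st with
    | [] => simpa [loopB] using h
    | (id, rem, hl, ch) :: rest =>
      by_cases hr : 0 < rem
      · simp only [loopB, if_pos hr] at h ⊢
        cases hg1 : PySem.List.pyGet? s i with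
        | none => rw [hg1] at h; simp at h
        | some nc2 =>
          cases hg2 : PySem.List.pyGet? s (i + 1) with
          | none => rw [hg1, hg2] at h; simp at h
          | some hl2 =>
            simp only [hg1, hg2] at h
            exact ih F'' hle' _ _ _ _ _ h
      · simp only [loopB, if_neg hr] at h ⊢
        exact ih F'' hle' _ _ _ _ _ h

-- the simulation: if A's recursion finishes a node, B's loop pops its frame with the same counter and index
theorem sim (d : Nat) : ∀ (s : List Int), (∀ x ∈ s, pvDomInt x = true) →
    ∀ i n tree n2 iend tA, fA d s i n tree = some (n2, iend, tA) →
    ∃ nc hl k, PySem.List.pyGet? s i = some nc ∧ PySem.List.pyGet? s (i + 1) = some hl ∧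
      k ≤ (2 ^ 32) ^ d ∧
      ∀ F rest chB treeB, ∃ treeB',
        loopB s (F + k) (i + 2) n ((n, nc, hl, chB) :: rest) treeB
          = loopB s F iend n2 rest treeB' := by
  induction d with
  | zero => intro s _ i n tree n2 iend tA h; simp [fA] at h
  | succ d ih =>
    intro s hs i n tree n2 iend tA h
    -- the child-sequence simulation, by induction on the remaining count
    have seq : ∀ (cnt : Nat) (i0 nd : Int) ch tree0 n' i' ch' tA',
        fALoop (fA d) s i0 nd ch tree0 cnt = some (n', i', ch', tA') →
        ∀ (r : Int), r.toNat = cnt →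
        ∃ k, k ≤ cnt * ((2 ^ 32) ^ d + 1) ∧
          ∀ F id hl0 chB rest treeB, ∃ chB' treeB',
            loopB s (F + k) i0 nd ((id, r, hl0, chB) :: rest) treeB
              = loopB s F i' n' ((id, r - (cnt : Int), hl0, chB') :: rest) treeB' := by
      intro cnt
      induction cnt with
      | zero =>
        intro i0 nd ch tree0 n' i' ch' tA' hl0 r hr
        simp only [fALoop, Option.some.injEq] at hl0
        obtain ⟨rfl, rfl, rfl, rfl⟩ := hl0
        exact ⟨0, by omega, fun F id hl0 chB rest treeB => ⟨chB, treeB, by simp⟩⟩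
      | succ c ihc =>
        intro i0 nd ch tree0 n' i' ch' tA' hloop r hr
        simp only [fALoop] at hloop
        cases hchild : fA d s i0 (nd + 1) tree0 with
        | none => rw [hchild] at hloop; simp at hloop
        | some res =>
          obtain ⟨na, ia, ta⟩ := res
          simp only [hchild] at hloop
          obtain ⟨nc_c, hl_c, k_c, hg1, hg2, hk_c, hsim_c⟩ :=
            ih s hs i0 (nd + 1) tree0 na ia ta hchild
          obtain ⟨k_r, hk_r, hsim_r⟩ :=
            ihc ia na (ch ++ [nd + 1]) ta n' i' ch' tA' hloop (r - 1) (by omega)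
          refine ⟨k_r + k_c + 1, by nlinarith [hk_c, hk_r], ?_⟩
          intro F id hl0 chB rest treeB
          have hrpos : 0 < r := by omega
          have hfe : F + (k_r + k_c + 1) = F + k_r + k_c + 1 := by omega
          rw [hfe]
          simp only [loopB, if_pos hrpos, hg1, hg2]
          obtain ⟨tB1, e1⟩ := hsim_c (F + k_r) ((id, r - 1, hl0, chB ++ [nd + 1]) :: rest) [] treeB
          rw [e1]
          obtain ⟨chB', tB2, e2⟩ := hsim_r F id hl0 (chB ++ [nd + 1]) rest tB1
          rw [e2]
          have : r - 1 - (c : Int) = r - ((c : Nat) + 1 : Nat) := by push_cast; ring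
          rw [this]
          exact ⟨chB', tB2, rfl⟩
    -- unfold the node case of fA
    simp only [fA] at h
    cases hg1 : PySem.List.pyGet? s i with
    | none => rw [hg1] at h; simp at h
    | some nc =>
      cases hg2 : PySem.List.pyGet? s (i + 1) with
      | none => rw [hg1, hg2] at h; simp at h
      | some hl =>
        simp only [hg1, hg2] at h
        cases hloop : fALoop (fA d) s (i + 2) n [] tree nc.toNat with
        | none => simp [hloop] at h
        | some res =>
          obtain ⟨nq, i2, ch, t2⟩ := res
          simp only [hloop, Option.some.injEq, Prod.mk.injEq] at h
          obtain ⟨rfl, rfl, rfl⟩ := h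
          obtain ⟨k_s, hk_s, hsim_s⟩ := seq nc.toNat (i + 2) n [] tree nq i2 ch t2 hloop nc rfl
          -- nc is an element of s, so nc.toNat ≤ 2^31
          have hmem : nc ∈ s := PySem.List.mem_of_pyGet?_eq_some _ hg1
          have hbound : nc.toNat ≤ 2 ^ 31 := by
            have := hs nc hmem
            simp [pvDomInt] at this
            omega
          refine ⟨nc, hl, k_s + 1, rfl, rfl, ?_, ?_⟩
          · rcases Nat.eq_zero_or_pos nc.toNat with h0 | hposn
            · have h1 : (1 : ℕ) ≤ (2 ^ 32) ^ (d + 1) := Nat.one_le_pow _ _ (by norm_num)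
              rw [h0] at hk_s; omega
            · cases d with
              | zero =>
                exfalso
                obtain ⟨c, hc⟩ : ∃ c, nc.toNat = c + 1 := ⟨nc.toNat - 1, by omega⟩
                rw [hc] at hloop
                simp [fALoop, fA] at hloop
              | succ d' =>
                have hP2 : 2 ≤ (2 ^ 32 : ℕ) ^ (d' + 1) := by
                  calc (2 : ℕ) ≤ 2 ^ 32 := by norm_num
                    _ ≤ (2 ^ 32) ^ (d' + 1) := Nat.le_self_pow (by omega) _
                have hexp : (2 ^ 32 : ℕ) ^ (d' + 1 + 1) = 2 ^ 32 * (2 ^ 32) ^ (d' + 1) := by ring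
                rw [hexp]
                have h1 : k_s ≤ 2 ^ 31 * ((2 ^ 32) ^ (d' + 1) + 1) :=
                  le_trans hk_s (Nat.mul_le_mul_right _ hbound)
                nlinarith [hP2, h1]
          · intro F rest chB treeB
            have hfe : F + (k_s + 1) = F + 1 + k_s := by omega
            rw [hfe]
            obtain ⟨chB', tB1, e1⟩ := hsim_s (F + 1) n hl chB rest treeB
            rw [e1]
            have hrem : ¬ (0 : Int) < nc - (nc.toNat : Int) := by omega
            simp only [loopB, if_neg hrem]
            exact ⟨_, rfl⟩

-- a successful grammar check means A's recursion returns, with the same end index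
theorem validNode_fA (d : Nat) : ∀ (s : List Int) i e, validNode d s i = some e →
    ∀ n tree, ∃ n2 tA, fA d s i n tree = some (n2, e, tA) := by
  induction d with
  | zero => intro s i e h; simp [validNode] at h
  | succ d ih =>
    intro s i e h n tree
    have seq : ∀ (cnt : Nat) (i0 : Int) j, validSeqG (validNode d) s i0 cnt = some j →
        ∀ nd ch tree0, ∃ n' ch' t', fALoop (fA d) s i0 nd ch tree0 cnt = some (n', j, ch', t') := by
      intro cnt
      induction cnt with
      | zero =>
        intro i0 j hv nd ch tree0
        simp only [validSeqG, Option.some.injEq] at hv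
        exact ⟨nd, ch, tree0, by simp [fALoop, hv]⟩
      | succ c ihc =>
        intro i0 j hv nd ch tree0
        simp only [validSeqG] at hv
        cases hn : validNode d s i0 with
        | none => rw [hn] at hv; simp at hv
        | some j1 =>
          simp only [hn] at hv
          obtain ⟨na, ta, hfa⟩ := ih s i0 j1 hn (nd + 1) tree0
          obtain ⟨n', ch', t', hrest⟩ := ihc j1 j hv na (ch ++ [nd + 1]) ta
          exact ⟨n', ch', t', by simp only [fALoop, hfa]; exact hrest⟩
    simp only [validNode] at h
    cases hg1 : PySem.List.pyGet? s i with
    | none => rw [hg1] at h; simp at h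
    | some nc =>
      cases hg2 : PySem.List.pyGet? s (i + 1) with
      | none => rw [hg1, hg2] at h; simp at h
      | some hl =>
        simp only [hg1, hg2] at h
        cases hv : validSeqG (validNode d) s (i + 2) nc.toNat with
        | none => simp [hv] at h
        | some j =>
          simp only [hv, Option.some.injEq] at h
          obtain ⟨n', ch', t', hloop⟩ := seq nc.toNat (i + 2) j hv n [] tree
          exact ⟨n', _, by simp only [fA, hg1, hg2, hloop]; rw [h]⟩

-- ===== VERDICT (by name: the statement is the Claim_ definition above) =====
theorem f_spec : Claim_equal_f := by
  intro s i node tree hdom hpre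
  unfold Spec_f
  have hs : ∀ x ∈ s, pvDomInt x = true := by
    unfold Dom_f at hdom
    simp only [Bool.and_eq_true, List.all_eq_true] at hdom
    exact fun x hx => hdom.1.1.1 x hx
  unfold Pre_f at hpre
  obtain ⟨e, hv⟩ := Option.isSome_iff_exists.mp hpre
  obtain ⟨n2, tA, hfa⟩ := validNode_fA (2 * s.length + 1) s i e hv node (PySem.Dict.ofList tree)
  have hf : f s i node tree = (n2, e) := by unfold f; simp only [hfa]
  obtain ⟨nc, hl, k, hg1, hg2, hk, hsim⟩ :=
    sim (2 * s.length + 1) s hs i node (PySem.Dict.ofList tree) n2 e tA hfa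
  obtain ⟨tB', hloop⟩ := hsim 1 [] [] (PySem.Dict.ofList tree)
  have hres : loopB s (1 + k) (i + 2) node [(node, nc, hl, [])] (PySem.Dict.ofList tree)
      = some (n2, e) := by rw [hloop]; simp [loopB]
  have hle : 1 + k ≤ (2 ^ 32) ^ (2 * s.length + 2) + 1 := by
    have : (2 ^ 32 : Nat) ^ (2 * s.length + 1) ≤ (2 ^ 32) ^ (2 * s.length + 2) :=
      Nat.pow_le_pow_right (by norm_num) (by omega)
    omega
  have hbig := loopB_mono (1 + k) ((2 ^ 32) ^ (2 * s.length + 2) + 1) hle _ _ _ _ _ hres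
  rw [hf]
  unfold f_alt
  simp only [hg1, hg2, hbig]
  rfl
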